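-- pv_equiv track=rewrite | github.com/SwagMuffin88/programmeerimise_alused | 13-recursion/Exercises.py | pair_star_recursive
-- ===== SOURCE A (Python) =====
-- def pair_star_recursive(s: str) -> str:
--     """
--     Add star between identical adjacent chars.
--
--     Given a string, compute recursively a new string
--     where identical chars that are adjacent in the original string
--     are separated from each other by a "*".
--
--     :param s: input string
--     :return: string with stars between identical chars.
--     """
--     if len(s) < 2:
--         return s
--     result = pair_star_recursive(s[:-1])
--     if s[-1] == s[-2]:
--         return result + "*" + s[-1]
--     else:
--         return result + s[-1]
-- ===== SOURCE B (Python) =====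
-- def pair_star_recursive(s: str) -> str:
--     """Iterative run-based version: split s into maximal runs of equal
--     characters and join each run's characters with '*'."""
--     parts = []
--     rest = s
--     while rest:
--         c = rest[0]
--         k = 1
--         while k < len(rest) and rest[k] == c:
--             k += 1
--         parts.append("*".join(rest[:k]))
--         rest = rest[k:]
--     return "".join(parts)
-- ===== Notes on version B (the rewrite author's own statement) =====
-- stated objective: faster
-- what changed: Replaces per-character recursion on the shrinking prefix (each step copies the prefix with s[:-1], giving quadratic work and O(n) recursion depth) with a single left-to-right iterative scan over maximal runs of equal characters, star-joining each run.
import Mathlib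
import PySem

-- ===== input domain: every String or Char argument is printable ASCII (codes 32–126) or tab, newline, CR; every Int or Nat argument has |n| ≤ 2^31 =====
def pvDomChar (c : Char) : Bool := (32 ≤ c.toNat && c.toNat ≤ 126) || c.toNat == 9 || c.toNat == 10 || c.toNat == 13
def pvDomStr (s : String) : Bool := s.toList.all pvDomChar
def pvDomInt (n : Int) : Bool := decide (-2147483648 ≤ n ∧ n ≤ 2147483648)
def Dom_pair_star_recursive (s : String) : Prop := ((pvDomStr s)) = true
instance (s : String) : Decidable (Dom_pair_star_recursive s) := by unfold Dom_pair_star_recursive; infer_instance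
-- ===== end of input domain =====

-- B replaces A's per-character recursion on the shrinking prefix by a single
-- iterative scan over maximal runs of equal characters, star-joining each run.

-- ===== PORT A =====
-- literal recursion of A over the character list: s[:-1] is PySem.List.slice l none (some (-1)),
-- s[-1] / s[-2] are PySem.List.pyGetD (always in range here since the length is ≥ 2)
def pair_star_recursive_rec (l : List Char) : List Char :=
  if l.length < 2 then l
  else
    let result := pair_star_recursive_rec (PySem.List.slice l none (some (-1)))
    if PySem.List.pyGetD l (-1) ' ' == PySem.List.pyGetD l (-2) ' ' then
      result ++ ['*', PySem.List.pyGetD l (-1) ' ']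
    else
      result ++ [PySem.List.pyGetD l (-1) ' ']
termination_by l.length
decreasing_by
  rw [PySem.List.slice_to_neg_one]
  simp only [List.length_dropLast]
  omega

def pair_star_recursive (s : String) : String :=
  String.ofList (pair_star_recursive_rec s.toList)

-- ===== PORT B =====
-- literal transcription of Source B's loop: peel off the maximal run of the first
-- character, '*'-join it (List.intersperse), recurse on the remainder
def pair_star_recursive_alt_rec (l : List Char) : List Char :=
  match l with
  | [] => []
  | c :: t =>
    List.intersperse '*' (c :: t.takeWhile (· == c))
      ++ pair_star_recursive_alt_rec (t.dropWhile (· == c))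
termination_by l.length
decreasing_by
  have := List.length_dropWhile_le (· == c) t
  simp only [List.length_cons]
  omega

def pair_star_recursive_alt (s : String) : String :=
  String.ofList (pair_star_recursive_alt_rec s.toList)

-- ===== PRECONDITION & SPEC =====
def Spec_pair_star_recursive (s : String) (out : String) : Prop := out = pair_star_recursive_alt s
instance (s : String) (out : String) : Decidable (Spec_pair_star_recursive s out) := by unfold Spec_pair_star_recursive; infer_instance

-- ===== CLAIM (what is proved, stated in full; the proofs are below) =====
def Claim_equal_pair_star_recursive : Prop := ∀ (s : String), Dom_pair_star_recursive s → Spec_pair_star_recursive s (pair_star_recursive s)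

-- ===== LEMMAS AND PROOFS =====

lemma alt_rec_nil : pair_star_recursive_alt_rec [] = [] := by
  simp [pair_star_recursive_alt_rec]

lemma alt_rec_singleton (a : Char) : pair_star_recursive_alt_rec [a] = [a] := by
  simp [pair_star_recursive_alt_rec]

-- B's run-peeling loop satisfies the simple one-step left recursion
lemma alt_rec_cons_cons (a b : Char) (t : List Char) :
    pair_star_recursive_alt_rec (a :: b :: t)
      = a :: (if a = b then '*' :: pair_star_recursive_alt_rec (b :: t)
              else pair_star_recursive_alt_rec (b :: t)) := by
  by_cases hab : a = b
  · subst hab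
    rw [pair_star_recursive_alt_rec]
    conv_rhs => rw [pair_star_recursive_alt_rec]
    simp [List.takeWhile, List.dropWhile]
  · rw [pair_star_recursive_alt_rec]
    have hba : (b == a) = false := by simp [beq_eq_false_iff_ne]; exact fun h => hab h.symm
    simp [List.takeWhile, List.dropWhile, hba, hab]

-- appending one character on the right
lemma alt_rec_snoc (l : List Char) (x : Char) :
    pair_star_recursive_alt_rec (l ++ [x])
      = pair_star_recursive_alt_rec l ++
          (match l.getLast? with
           | none => [x]
           | some y => if y = x then ['*', x] else [x]) := by
  induction l with
  | nil => simp [alt_rec_nil, alt_rec_singleton]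
  | cons a t ih =>
    cases t with
    | nil =>
      simp only [List.cons_append, List.nil_append, alt_rec_cons_cons, alt_rec_singleton,
        List.getLast?_singleton]
    | cons b t' =>
      have hlast : (a :: b :: t').getLast? = (b :: t').getLast? := by
        simp [List.getLast?_cons_cons]
      simp only [List.cons_append]
      simp only [List.cons_append] at ih
      rw [alt_rec_cons_cons a b (t' ++ [x]), ih, alt_rec_cons_cons, hlast]
      by_cases h : a = b <;> simp [h]

-- A's recursion computes the same list as B's run scan
lemma a_rec_eq_alt_rec (l : List Char) : pair_star_recursive_rec l = pair_star_recursive_alt_rec l := by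
  induction l using List.reverseRecOn with
  | nil => rw [pair_star_recursive_rec]; simp [alt_rec_nil]
  | append_singleton l x ih =>
    rcases l with _ | ⟨a, t⟩
    · rw [pair_star_recursive_rec]; simp [alt_rec_singleton]
    · rw [pair_star_recursive_rec]
      have hlen : ¬ ((a :: t) ++ [x]).length < 2 := by simp
      have h2 : PySem.List.pyGetD ((a :: t) ++ [x]) (-2) ' ' = (a :: t).getLast (by simp) := by
        rw [PySem.List.pyGetD_neg_ofNat ((a :: t) ++ [x]) 2 ' ' (by omega) (by simp)]
        rw [List.getLast_eq_getElem]
        rw [List.getElem_append_left (by simp)]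
        simp
      have hgl : (a :: t).getLast? = some ((a :: t).getLast (by simp)) :=
        List.getLast?_eq_some_getLast (by simp)
      rw [if_neg hlen, PySem.List.slice_to_neg_one, List.dropLast_concat, ih,
        alt_rec_snoc, PySem.List.pyGetD_neg_one_append_singleton, h2, hgl]
      by_cases hx : (a :: t).getLast (by simp) = x
      · simp [hx]
      · have : (x == (a :: t).getLast (by simp)) = false := by
          simp [beq_eq_false_iff_ne]; exact fun h => hx h.symm
        simp [this, hx]

-- ===== VERDICT (by name: the statement is the Claim_ definition above) =====
theorem pair_star_recursive_spec : Claim_equal_pair_star_recursive := by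
  intro s _
  unfold Spec_pair_star_recursive pair_star_recursive pair_star_recursive_alt
  rw [a_rec_eq_alt_rec]
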